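-- pv_equiv track=rewrite | github.com/arlaine4/42-Maths-Piscine | ex07/sat.py | build_dico_from_rpn
-- ===== SOURCE A (Python) =====
-- operators = ['^', '|', '=', '&', '>', '!']
--
-- def build_dico_from_rpn(rpn):
--     dico = {}
--     for index, elem in enumerate(rpn):
--         if elem not in operators:
--             if elem not in dico:
--                 dico[elem] = [index]
--             elif elem in dico:
--                 dico[elem].append(index)
--     return dico
-- ===== SOURCE B (Python) =====
-- operators = ['^', '|', '=', '&', '>', '!']
--
-- def build_dico_from_rpn(rpn):
--     symbols = dict.fromkeys(e for e in rpn if e not in operators)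
--     return {s: [i for i, e in enumerate(rpn) if e == s] for s in symbols}
-- ===== Notes on version B (the rewrite author's own statement) =====
-- stated objective: alternative
-- what changed: A builds the dict in one accumulating pass, appending each index as it goes; B first dedups the non-operator symbols with dict.fromkeys and then rescans the whole rpn once per distinct symbol to collect its indices.
import Mathlib
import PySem

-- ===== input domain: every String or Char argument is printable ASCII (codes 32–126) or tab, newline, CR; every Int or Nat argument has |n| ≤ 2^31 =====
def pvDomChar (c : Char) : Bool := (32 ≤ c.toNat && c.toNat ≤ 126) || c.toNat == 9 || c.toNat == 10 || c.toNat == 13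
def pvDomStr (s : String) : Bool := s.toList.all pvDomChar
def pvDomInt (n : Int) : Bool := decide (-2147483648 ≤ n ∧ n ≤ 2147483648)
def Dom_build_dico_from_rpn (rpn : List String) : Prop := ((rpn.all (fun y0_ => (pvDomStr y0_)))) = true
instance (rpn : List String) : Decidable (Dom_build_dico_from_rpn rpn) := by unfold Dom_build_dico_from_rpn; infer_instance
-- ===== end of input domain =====

-- B replaces A's single accumulating dict pass by a dedup of the non-operator symbols
-- followed by one full rescan of rpn per distinct symbol (objective: alternative decomposition).

-- module-level constant 'operators'
def pvOperators : List String := ["^", "|", "=", "&", ">", "!"]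

-- ===== PORT A =====
-- one pass over enumerate(rpn), building a dict: new key -> [index], seen key -> append index
def build_dico_from_rpn (rpn : List String) : List (String × List Int) :=
  ((PySem.List.enumerate rpn 0).foldl
    (fun (d : PySem.Dict String (List Int)) (p : Int × String) =>
      if pvOperators.contains p.2 then d
      else if d.contains p.2 = false then d.insert p.2 [p.1]
      else d.modify p.2 [] (fun l => l ++ [p.1]))
    PySem.Dict.empty).items

-- ===== PORT B =====
-- dict.fromkeys of the non-operator symbols, then one rescan of enumerate(rpn) per symbol
def build_dico_from_rpn_alt (rpn : List String) : List (String × List Int) :=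
  (PySem.List.dedup (rpn.filter (fun e => !pvOperators.contains e))).map
    (fun s => (s, ((PySem.List.enumerate rpn 0).filter (fun p => p.2 == s)).map (·.1)))

-- ===== PRECONDITION & SPEC =====
def Spec_build_dico_from_rpn (rpn : List String) (out : List (String × List Int)) : Prop := out = build_dico_from_rpn_alt rpn
instance (rpn : List String) (out : List (String × List Int)) : Decidable (Spec_build_dico_from_rpn rpn out) := by unfold Spec_build_dico_from_rpn; infer_instance

-- ===== CLAIM (what is proved, stated in full; the proofs are below) =====
def Claim_equal_build_dico_from_rpn : Prop := ∀ (rpn : List String), Dom_build_dico_from_rpn rpn → Spec_build_dico_from_rpn rpn (build_dico_from_rpn rpn)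

-- ===== LEMMAS AND PROOFS =====

-- A's step: the insert branch on a fresh key is exactly modify with default []
lemma pv_step_eq (d : PySem.Dict String (List Int)) (p : Int × String) :
    (if pvOperators.contains p.2 then d
     else if d.contains p.2 = false then d.insert p.2 [p.1]
     else d.modify p.2 [] (fun l => l ++ [p.1]))
    = (if pvOperators.contains p.2 then d else d.modify p.2 [] (fun l => l ++ [p.1])) := by
  by_cases hop : pvOperators.contains p.2
  · rw [if_pos hop, if_pos hop]
  · rw [if_neg hop, if_neg hop]
    by_cases hc : d.contains p.2 = false
    · rw [if_pos hc]
      show _ = d.insert p.2 ((d.getD p.2 []) ++ [p.1])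
      rw [PySem.Dict.getD_of_not_contains d [] hc, List.nil_append]
    · rw [if_neg hc]

-- fold with the operator guard = fold of the unguarded modify over the filtered list
lemma pv_foldl_filter (l : List (Int × String)) (d : PySem.Dict String (List Int)) :
    l.foldl (fun d p =>
      if pvOperators.contains p.2 then d
      else if d.contains p.2 = false then d.insert p.2 [p.1]
      else d.modify p.2 [] (fun l => l ++ [p.1])) d
    = (l.filter (fun p => !pvOperators.contains p.2)).foldl
        (fun d p => d.modify p.2 [] (fun l => l ++ [p.1])) d := by
  induction l generalizing d with
  | nil => rfl
  | cons x xs ih =>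
    rw [List.foldl_cons, pv_step_eq, List.filter_cons]
    by_cases hop : pvOperators.contains x.2
    · rw [if_pos hop, if_neg (by rw [hop]; simp)]
      exact ih d
    · rw [if_neg hop, if_pos (by simpa using hop), List.foldl_cons]
      exact ih _

-- getD after the modify-append loop keyed on the second component
lemma pv_loop_getD (l : List (Int × String)) (d : PySem.Dict String (List Int)) (c : String) :
    (l.foldl (fun d p => d.modify p.2 [] (fun v => v ++ [p.1])) d).getD c []
    = d.getD c [] ++ (l.filter (fun p => p.2 == c)).map (·.1) := by
  have h : l.foldl (fun d p => d.modify p.2 [] (fun v => v ++ [p.1])) d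
      = (l.map (fun p => (p.2, p.1))).foldl (fun d q => d.modify q.1 [] (fun v => v ++ [q.2])) d := by
    rw [List.foldl_map]
  rw [h, PySem.Dict.getD_foldl_modify_append, List.filter_map, List.map_map]
  rfl

-- keys after the modify-append loop keyed on the second component
lemma pv_loop_keys (l : List (Int × String)) (d : PySem.Dict String (List Int)) :
    (l.foldl (fun d p => d.modify p.2 [] (fun v => v ++ [p.1])) d).keys
    = PySem.Set.update d.keys (l.map (·.2)) := by
  have h : l.foldl (fun d p => d.modify p.2 [] (fun v => v ++ [p.1])) d
      = (l.map (fun p => (p.2, p.1))).foldl (fun d q => d.modify q.1 [] (fun v => v ++ [q.2])) d := by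
    rw [List.foldl_map]
  rw [h, PySem.Dict.keys_foldl_modify_key (l.map (fun p => (p.2, p.1))) Prod.fst []
        (fun _ q => fun v => v ++ [q.2]) d, List.map_map]
  rfl

-- the non-operator symbols of rpn, in traversal order
lemma pv_filtered_snd (rpn : List String) :
    ((PySem.List.enumerate rpn 0).filter (fun p => !pvOperators.contains p.2)).map (·.2)
    = rpn.filter (fun e => !pvOperators.contains e) := by
  conv_rhs => rw [← PySem.List.map_snd_enumerate rpn 0]
  rw [List.filter_map]
  rfl

theorem build_dico_from_rpn_spec : Claim_equal_build_dico_from_rpn := by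
  intro rpn _
  unfold Spec_build_dico_from_rpn build_dico_from_rpn build_dico_from_rpn_alt
  rw [pv_foldl_filter]
  set lf := (PySem.List.enumerate rpn 0).filter (fun p => !pvOperators.contains p.2) with hlf
  set D := lf.foldl (fun d p => d.modify p.2 [] (fun v => v ++ [p.1])) PySem.Dict.empty with hD
  have hkeys : D.keys = PySem.Set.ofList (rpn.filter (fun e => !pvOperators.contains e)) := by
    rw [hD, pv_loop_keys, PySem.Dict.keys_empty, PySem.Set.update_nil_left, pv_filtered_snd]
  have hnd : D.keys.Nodup := by
    rw [hkeys]; exact PySem.Set.nodup_ofList _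
  rw [PySem.Dict.items_eq_map_keys D hnd [], hkeys]
  have hded : PySem.List.dedup (rpn.filter (fun e => !pvOperators.contains e))
      = PySem.Set.ofList (rpn.filter (fun e => !pvOperators.contains e)) := rfl
  rw [hded]
  apply List.map_congr_left
  intro s hs
  have hsq : pvOperators.contains s = false := by
    have := (PySem.Set.mem_ofList _ _).mp hs
    have := List.of_mem_filter this
    simpa using this
  have hget : D.getD s [] = (lf.filter (fun p => p.2 == s)).map (·.1) := by
    rw [hD, pv_loop_getD, PySem.Dict.getD_empty, List.nil_append]
  rw [hget, hlf, List.filter_filter]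
  have hfil : (PySem.List.enumerate rpn 0).filter (fun a => a.2 == s && !pvOperators.contains a.2)
      = (PySem.List.enumerate rpn 0).filter (fun p => p.2 == s) := by
    apply List.filter_congr
    intro p _
    cases hb : (p.2 == s) with
    | false => rw [Bool.false_and]
    | true =>
      rw [Bool.true_and]
      have hp2 : p.2 = s := eq_of_beq hb
      rw [hp2, hsq]
      rfl
  rw [hfil]
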